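-- pv_equiv track=rewrite | github.com/SSAFY-6-1-3/Algorithm | 220215/p_42748_junh.py | solution
-- ===== SOURCE A (Python) =====
-- def solution(array, commands):
--     answer = []
--     for command in commands:
--         s, e, t = command
--         cut = array[s-1:e]
--         cut.sort()
--         answer.append(cut[t-1])
--     return answer
-- ===== SOURCE B (Python) =====
-- def _select(xs, k):
--     # k-th smallest (0-based) of xs via quickselect partitioning, 0 <= k < len(xs)
--     p = xs[0]
--     lt = [x for x in xs if x < p]
--     if k < len(lt):
--         return _select(lt, k)
--     le = len([x for x in xs if x <= p])
--     if k < le: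
--         return p
--     return _select([x for x in xs if x > p], k - le)
--
--
-- def solution(array, commands):
--     answer = []
--     for command in commands:
--         s, e, t = command
--         sub = array[s-1:e]
--         k = t - 1
--         if not (0 <= k < len(sub)):
--             raise IndexError("rank out of range")
--         answer.append(_select(sub, k))
--     return answer
-- ===== Notes on version B (the rewrite author's own statement) =====
-- stated objective: alternative
-- what changed: Each command's t-th smallest is computed by an explicit quickselect (partition the subrange around a pivot and recurse only into the side containing rank t-1) instead of slicing, fully sorting and indexing.
-- outside the precondition, e.g. on solution([5, 2, 9], [[1, 3, 0]]): A returns [9], B raises IndexError; on solution([5, 2, 9], [[1, 3, -1]]): A returns [5], B raises IndexError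
import Mathlib
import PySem

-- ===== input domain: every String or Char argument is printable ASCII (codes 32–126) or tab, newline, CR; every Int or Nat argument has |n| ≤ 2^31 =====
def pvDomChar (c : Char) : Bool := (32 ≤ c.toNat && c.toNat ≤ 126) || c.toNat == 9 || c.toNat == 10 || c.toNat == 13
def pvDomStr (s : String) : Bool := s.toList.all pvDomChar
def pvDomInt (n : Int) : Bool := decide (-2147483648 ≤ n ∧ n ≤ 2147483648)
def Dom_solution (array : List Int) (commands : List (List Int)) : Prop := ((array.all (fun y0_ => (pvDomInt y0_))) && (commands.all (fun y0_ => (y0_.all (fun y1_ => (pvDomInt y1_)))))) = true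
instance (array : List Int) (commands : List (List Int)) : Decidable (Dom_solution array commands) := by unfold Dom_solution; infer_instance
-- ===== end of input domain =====

-- B replaces per-command slice/sort/index with a quickselect (partition around a pivot, recurse
-- into the side holding rank t-1): a different selection algorithm, same per-command loop.


-- ===== PORT A =====
def solution (array : List Int) (commands : List (List Int)) : List Int :=
  commands.foldl (fun answer command =>
    match command with
    | [s, e, t] =>
      let cut := PySem.List.slice array (some (s - 1)) (some e)
      let cutSorted := PySem.List.sorted cut (fun x => x) false   -- cut.sort()
      answer ++ [PySem.List.pyGetD cutSorted (t - 1) 0]           -- cut[t-1]; IndexError excluded by Pre_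
    | _ => answer) []                                              -- unpacking raises; excluded by Pre_

-- ===== PORT B =====
-- quickselect: k-th smallest (0-based) of xs, for 0 ≤ k < xs.length (_select in Source B)
def qselect : List Int → Nat → Int
  | [], _ => 0                    -- unreachable under the caller's range guard
  | p :: rest, k =>
    let lt := (p :: rest).filter (fun x => x < p)
    if k < lt.length then qselect lt k
    else
      let le := ((p :: rest).filter (fun x => x ≤ p)).length
      if k < le then p
      else qselect ((p :: rest).filter (fun x => p < x)) (k - le)
termination_by xs _ => xs.length
decreasing_by
  · simp only [List.filter_cons, decide_eq_true_eq, lt_irrefl, if_false]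
    exact Nat.lt_succ_of_le (List.length_filter_le _ _)
  · simp only [List.filter_cons, decide_eq_true_eq, lt_irrefl, if_false]
    exact Nat.lt_succ_of_le (List.length_filter_le _ _)

def solution_alt (array : List Int) (commands : List (List Int)) : List Int :=
  commands.foldl (fun answer command =>
    if command.length = 3 then    -- 's, e, t = command' needs exactly three items
      let s := command.getD 0 0
      let e := command.getD 1 0
      let t := command.getD 2 0
      let sub := PySem.List.slice array (some (s - 1)) (some e)
      if 0 ≤ t - 1 ∧ t - 1 < (sub.length : Int)
      then answer ++ [qselect sub (t - 1).toNat]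
      else answer                 -- Source B raises IndexError here; excluded by Pre_
    else answer) []               -- unpacking raises; excluded by Pre_

-- ===== PRECONDITION & SPEC =====
-- Pre_ excludes commands whose rank t falls outside 1..len(array[s-1:e]) and commands not of
-- length 3: for t ≤ 0 A returns a value only by Python's accidental negative-index wraparound
-- (cut[t-1] counted from the end), on the rest A raises; B's quickselect guard raises
-- IndexError on all of them.
def Pre_solution (array : List Int) (commands : List (List Int)) : Prop :=
  ∀ c ∈ commands, c.length = 3 ∧ 1 ≤ c.getD 2 0 ∧
    c.getD 2 0 ≤ ((PySem.List.slice array (some (c.getD 0 0 - 1)) (some (c.getD 1 0))).length : Int)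
instance (array : List Int) (commands : List (List Int)) : Decidable (Pre_solution array commands) := by
  unfold Pre_solution; infer_instance

def pvWitness_solution : List Int × List (List Int) := ([5, 2, 9], [[1, 3, 2]])

def Spec_solution (array : List Int) (commands : List (List Int)) (out : List Int) : Prop := out = solution_alt array commands
instance (array : List Int) (commands : List (List Int)) (out : List Int) : Decidable (Spec_solution array commands out) := by unfold Spec_solution; infer_instance

-- ===== CLAIM (what is proved, stated in full; the proofs are below) =====
def Claim_equal_solution : Prop := ∀ (array : List Int) (commands : List (List Int)), Dom_solution array commands → Pre_solution array commands → Spec_solution array commands (solution array commands)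

-- ===== LEMMAS AND PROOFS =====

-- the three-way partition of xs around p, concatenated, is a permutation of xs
lemma tri_perm (xs : List Int) (p : Int) :
    ((xs.filter (fun x => x < p) ++ xs.filter (fun x => x = p)) ++ xs.filter (fun x => p < x)).Perm xs := by
  induction xs with
  | nil => simp
  | cons a xs ih =>
    simp only [List.filter_cons, decide_eq_true_eq]
    by_cases h1 : a < p
    · rw [if_pos h1, if_neg (by omega : ¬ a = p), if_neg (by omega : ¬ p < a)]
      exact ih.cons a
    · by_cases h2 : a = p
      · rw [if_neg h1, if_pos h2, if_neg (by omega : ¬ p < a), List.append_assoc]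
        have ih' := ih.cons a
        rw [List.append_assoc] at ih'
        exact List.perm_middle.trans ih'
      · rw [if_neg h1, if_neg h2, if_pos (by omega : p < a)]
        exact List.perm_middle.trans (ih.cons a)

-- sorting xs is sorting the partition pieces and concatenating them
lemma sorted_decomp (xs : List Int) (p : Int) :
    PySem.List.sorted xs (fun x => x) false =
      (PySem.List.sorted (xs.filter (fun x => x < p)) (fun x => x) false
        ++ xs.filter (fun x => x = p))
      ++ PySem.List.sorted (xs.filter (fun x => p < x)) (fun x => x) false := by
  apply PySem.List.sorted_id_eq_of_perm_of_pairwise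
  · exact (((PySem.List.sorted_perm _ _ _).append (List.Perm.refl _)).append
      (PySem.List.sorted_perm _ _ _)).trans (tri_perm xs p)
  · rw [List.pairwise_append, List.pairwise_append]
    refine ⟨⟨?_, ?_, ?_⟩, ?_, ?_⟩
    · exact PySem.List.sorted_pairwise _ _
    · refine List.pairwise_of_forall_mem_list ?_
      intro a ha b hb
      have ha' := (List.mem_filter.mp ha).2
      have hb' := (List.mem_filter.mp hb).2
      simp at ha' hb'; omega
    · intro a ha b hb
      have ha' := (List.mem_filter.mp ((PySem.List.mem_sorted _ _ _ _).mp ha)).2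
      have hb' := (List.mem_filter.mp hb).2
      simp at ha' hb'; omega
    · exact PySem.List.sorted_pairwise _ _
    · intro a ha b hb
      have hb' := (List.mem_filter.mp ((PySem.List.mem_sorted _ _ _ _).mp hb)).2
      rcases List.mem_append.mp ha with ha | ha
      · have ha' := (List.mem_filter.mp ((PySem.List.mem_sorted _ _ _ _).mp ha)).2
        simp at ha' hb'; omega
      · have ha' := (List.mem_filter.mp ha).2
        simp at ha' hb'; omega

lemma le_split (xs : List Int) (p : Int) :
    (xs.filter (fun x => x ≤ p)).length =
      (xs.filter (fun x => x < p)).length + (xs.filter (fun x => x = p)).length := by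
  induction xs with
  | nil => simp
  | cons a xs ih =>
    by_cases h1 : a < p <;> by_cases h2 : a = p <;>
      simp [h1, h2, show a ≤ p ↔ a < p ∨ a = p by omega, ih] <;> omega

-- quickselect computes the k-th entry of the sorted list
lemma qselect_sorted (xs : List Int) (k : Nat) (hk : k < xs.length) :
    qselect xs k = (PySem.List.sorted xs (fun x => x) false).getD k 0 := by
  induction xs, k using qselect.induct with
  | case1 k => simp at hk
  | case2 p rest k lt hlt ih =>
    have hlt' : k < (List.filter (fun x => decide (x < p)) (p :: rest)).length := hlt
    have hsd := sorted_decomp (p :: rest) p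
    have hlenA : (PySem.List.sorted ((p :: rest).filter (fun x => x < p)) (fun x => x) false).length
        = (List.filter (fun x => decide (x < p)) (p :: rest)).length :=
      PySem.List.length_sorted _ _ _
    rw [qselect, if_pos hlt', ih hlt, hsd, List.getD_eq_getElem?_getD, List.getD_eq_getElem?_getD,
      List.getElem?_append_left (by simp only [List.length_append]; omega),
      List.getElem?_append_left (by omega)]
  | case3 p rest k lt hlt le hle =>
    have hlt' : ¬ k < (List.filter (fun x => decide (x < p)) (p :: rest)).length := hlt
    have hle' : k < (List.filter (fun x => decide (x ≤ p)) (p :: rest)).length := hle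
    have hsd := sorted_decomp (p :: rest) p
    have hlenA : (PySem.List.sorted ((p :: rest).filter (fun x => x < p)) (fun x => x) false).length
        = (List.filter (fun x => decide (x < p)) (p :: rest)).length :=
      PySem.List.length_sorted _ _ _
    have hsplit := le_split (p :: rest) p
    rw [qselect, if_neg hlt', if_pos hle', hsd, List.getD_eq_getElem?_getD,
      List.getElem?_append_left (by simp only [List.length_append]; omega),
      List.getElem?_append_right (by omega),
      List.getElem?_eq_getElem (by omega)]
    have hmem : ((p :: rest).filter (fun x => x = p))[k -
        (PySem.List.sorted ((p :: rest).filter (fun x => x < p)) (fun x => x) false).length]'(by omega) ∈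
        (p :: rest).filter (fun x => x = p) := List.getElem_mem _
    have heq := (List.mem_filter.mp hmem).2
    simp only [decide_eq_true_eq] at heq
    simp only [Option.getD_some]
    exact heq.symm
  | case4 p rest k lt hlt le hle ih =>
    have hlt' : ¬ k < (List.filter (fun x => decide (x < p)) (p :: rest)).length := hlt
    have hle' : ¬ k < (List.filter (fun x => decide (x ≤ p)) (p :: rest)).length := hle
    have hsd := sorted_decomp (p :: rest) p
    have hlenA : (PySem.List.sorted ((p :: rest).filter (fun x => x < p)) (fun x => x) false).length
        = (List.filter (fun x => decide (x < p)) (p :: rest)).length :=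
      PySem.List.length_sorted _ _ _
    have hsplit := le_split (p :: rest) p
    have hperm := (tri_perm (p :: rest) p).length_eq
    simp only [List.length_append] at hperm
    have hdefle : le = (List.filter (fun x => decide (x ≤ p)) (p :: rest)).length := rfl
    have hdeflt : lt.length = (List.filter (fun x => decide (x < p)) (p :: rest)).length := rfl
    have hk' : k - (List.filter (fun x => decide (x ≤ p)) (p :: rest)).length <
        ((p :: rest).filter (fun x => p < x)).length := by
      simp only [List.length_cons] at hk hperm; omega
    rw [qselect, if_neg hlt', if_neg hle', ih hk', hsd, List.getD_eq_getElem?_getD,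
      List.getD_eq_getElem?_getD,
      List.getElem?_append_right (by simp only [List.length_append]; omega)]
    congr 2
    simp only [List.length_append]; omega

-- ===== VERDICT (by name: the statement is the Claim_ definition above) =====
theorem solution_spec : Claim_equal_solution := by
  intro array commands _ hpre
  unfold Spec_solution solution solution_alt
  apply PySem.List.foldl_congr_mem
  intro acc c hc
  obtain ⟨hlen, ht1, ht2⟩ := hpre c hc
  match c, hlen with
  | [s, e, t], _ =>
    simp at ht1 ht2
    rw [if_pos (show ([s, e, t] : List Int).length = 3 by rfl)]
    simp only [List.getD_cons_succ, List.getD_cons_zero]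
    have hcond : 0 ≤ t - 1 ∧ t - 1 < ((PySem.List.slice array (some (s - 1)) (some e)).length : Int) := by
      exact ⟨by omega, by omega⟩
    rw [if_pos hcond]
    congr 1
    have hk : (t - 1).toNat < (PySem.List.slice array (some (s - 1)) (some e)).length := by omega
    have hi : t - 1 = (((t - 1).toNat : Nat) : Int) := by omega
    rw [qselect_sorted _ _ hk, hi, PySem.List.pyGetD_natCast]
    simp
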